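-- pv_equiv track=rewrite | github.com/hnguyen0428/style_checker | sstyle.py | within_quotes
-- ===== SOURCE A (Python) =====
-- BACKSLASH = '\\'
--
-- DOUBLE_QUOTE = '\"'
--
-- def within_quotes(s, lo, hi):
--     # Capture ranges that are within a string
--     ranges = []
--     index = s.find(DOUBLE_QUOTE)
--     if index == -1:
--         return False
--
--     # Look for matching double quotes that are not escaped
--     in_quote = False
--     prev_quote = index
--     for i in range(index, len(s)):
--         # Check if char at index i is a double quotes that is not escaped
--         if s[i] == DOUBLE_QUOTE and (i == 0 or s[i-1] != BACKSLASH):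
--             if in_quote:
--                 in_quote = False
--                 ranges.append((prev_quote, i+1))
--             else:
--                 in_quote = True
--                 prev_quote = i
--
--     # If the range is within the quotes
--     return any([lo > left and hi < right for (left, right) in ranges])
-- ===== SOURCE B (Python) =====
-- BACKSLASH = '\\'
--
-- DOUBLE_QUOTE = '\"'
--
--
-- def within_quotes(s, lo, hi):
--     # Neutralize escaped quotes (same naive rule: a quote directly preceded by a
--     # backslash) by rewriting the two-char pattern \" to \ + NUL (same length, so
--     # positions are preserved), then split on the remaining, non-escaped quotes.
--     parts = s.replace(BACKSLASH + DOUBLE_QUOTE, BACKSLASH + '\x00').split(DOUBLE_QUOTE)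
--     # parts alternate outside/inside text; an inside segment parts[1] spans
--     # [start, end] between its two quotes, and it is closed iff at least one
--     # more part follows it.  (lo, hi) lies within a string iff it lies within
--     # such a span.  Walk the segments two at a time.
--     pos = 0
--     rest = parts
--     while len(rest) >= 3:
--         start = pos + len(rest[0]) + 1
--         end = start + len(rest[1])
--         if start <= lo and hi <= end:
--             return True
--         pos = end + 1
--         rest = rest[2:]
--     return False
-- ===== Notes on version B (the rewrite author's own statement) =====
-- stated objective: idiomatic
-- what changed: Replaces the find-then-toggle state machine over character indices by string rewriting: escaped quotes are neutralized with one str.replace (same-length placeholder), the string is split on the remaining quotes, and (lo,hi) is tested against the spans of the closed inside segments.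
import Mathlib
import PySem

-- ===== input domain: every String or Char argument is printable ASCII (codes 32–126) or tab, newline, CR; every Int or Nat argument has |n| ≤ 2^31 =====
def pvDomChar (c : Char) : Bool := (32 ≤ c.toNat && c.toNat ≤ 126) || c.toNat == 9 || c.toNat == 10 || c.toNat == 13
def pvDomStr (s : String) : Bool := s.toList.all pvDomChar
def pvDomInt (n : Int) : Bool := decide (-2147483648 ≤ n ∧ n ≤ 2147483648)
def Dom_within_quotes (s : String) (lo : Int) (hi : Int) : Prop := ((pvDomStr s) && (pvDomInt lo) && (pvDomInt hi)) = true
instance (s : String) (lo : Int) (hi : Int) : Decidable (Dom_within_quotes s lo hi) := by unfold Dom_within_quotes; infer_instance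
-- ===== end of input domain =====

-- B replaces A's find-then-toggle index state machine by string rewriting: one
-- str.replace neutralizes escaped quotes, split('"') yields the segments, and the
-- spans of the closed inside segments are tested; idiomatic stdlib decomposition.


-- ===== PORT A =====
def within_quotes (s : String) (lo : Int) (hi : Int) : Bool :=
  let ranges : List (Int × Int) := []
  let index := PySem.Str.find s "\""
  if index == -1 then false
  else
    let st := (PySem.List.pyRange index (PySem.Str.len s) 1).foldl
      (fun (st : Bool × Int × List (Int × Int)) i =>
        if PySem.Str.pyGet? s i == some '"' && (i == 0 || PySem.Str.pyGet? s (i-1) != some '\\') then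
          if st.1 then (false, st.2.1, st.2.2 ++ [(st.2.1, i+1)])
          else (true, i, st.2.2)
        else st)
      (false, index, ranges)
    (st.2.2.map (fun pr => decide (lo > pr.1) && decide (hi < pr.2))).any id

-- ===== PORT B =====
-- the while loop over 'rest' (consuming two segments per step, rest = rest[2:])
def segWalk (rest : List (List Char)) (pos : Int) (lo : Int) (hi : Int) : Bool :=
  match rest with
  | o :: q :: r :: t =>
    let start := pos + o.length + 1
    let e := start + q.length
    if decide (start ≤ lo) && decide (hi ≤ e) then true
    else segWalk (r :: t) (e + 1) lo hi  -- rest[2:]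
  | _ => false

def within_quotes_alt (s : String) (lo : Int) (hi : Int) : Bool :=
  let parts := PySem.Chars.splitOn
    (PySem.Chars.replace s.toList ('\\' :: "\"".toList) ('\\' :: ['\x00'])) "\"".toList
  segWalk parts 0 lo hi

-- ===== PRECONDITION & SPEC =====
def Spec_within_quotes (s : String) (lo : Int) (hi : Int) (out : Bool) : Prop := out = within_quotes_alt s lo hi
instance (s : String) (lo : Int) (hi : Int) (out : Bool) : Decidable (Spec_within_quotes s lo hi out) := by unfold Spec_within_quotes; infer_instance

-- ===== CLAIM (what is proved, stated in full; the proofs are below) =====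
def Claim_equal_within_quotes : Prop := ∀ (s : String) (lo : Int) (hi : Int), Dom_within_quotes s lo hi → Spec_within_quotes s lo hi (within_quotes s lo hi)

-- ===== LEMMAS AND PROOFS =====

-- quote positions of a char list starting at index n with previous char p (A's escape rule)
def qlist (cs : List Char) (n : Int) (p : Option Char) : List Int :=
  match cs with
  | [] => []
  | c :: t =>
    if c = '"' ∧ p ≠ some '\\' then n :: qlist t (n+1) (some c)
    else qlist t (n+1) (some c)

-- consecutive pairing of quote positions, as A's ranges
def qpairs (q : List Int) : List (Int × Int) :=
  match q with
  | a :: b :: t => (a, b+1) :: qpairs t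
  | _ => []

-- 'some complete pair strictly contains (lo,hi)' over a flat position list
def pairCheck (quotes : List Int) (lo hi : Int) : Bool :=
  match quotes with
  | a :: b :: t => if decide (lo > a) && decide (hi < b + 1) then true else pairCheck t lo hi
  | _ => false

-- char-level reformulation of A's loop
def loopC (cs : List Char) (n : Int) (p : Option Char) (st : Bool × Int × List (Int × Int)) :
    Bool × Int × List (Int × Int) :=
  match cs with
  | [] => st
  | c :: t =>
    if c = '"' ∧ p ≠ some '\\' then
      if st.1 then loopC t (n+1) (some c) (false, st.2.1, st.2.2 ++ [(st.2.1, n+1)])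
      else loopC t (n+1) (some c) (true, n, st.2.2)
    else loopC t (n+1) (some c) st

-- B-side model: the rewriting step (replace '\"' -> '\NUL', left-to-right, non-overlapping)
def repl : List Char → List Char
  | [] => []
  | [c] => [c]
  | c :: d :: t =>
    if c = '\\' ∧ d = '"' then '\\' :: '\x00' :: repl t
    else c :: repl (d :: t)

-- positions of the plain character '"'
def idxQ (cs : List Char) (n : Int) : List Int :=
  match cs with
  | [] => []
  | c :: t => if c = '"' then n :: idxQ t (n+1) else idxQ t (n+1)

-- model of split('"')
def splitQ : List Char → List (List Char)
  | [] => [[]]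
  | c :: t => if c = '"' then [] :: splitQ t else (splitQ t).modifyHead (c :: ·)

-- quote positions recovered from the segment list
def posFrom (parts : List (List Char)) (pos : Int) : List Int :=
  match parts with
  | s :: r :: t => (pos + s.length) :: posFrom (r :: t) (pos + s.length + 1)
  | _ => []

lemma splitQ_ne_nil (l : List Char) : splitQ l ≠ [] := by
  induction l with
  | nil => simp [splitQ]
  | cons c t ih =>
    simp only [splitQ]
    split_ifs
    · simp
    · cases h : splitQ t with
      | nil => exact absurd h ih
      | cons a u => simp [List.modifyHead]

lemma replace_go (fuel : Nat) : ∀ (l acc : List Char), l.length ≤ fuel →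
    PySem.Chars.replace.go ['\\', '"'] ['\\', '\x00'] fuel l acc = acc.reverse ++ repl l := by
  induction fuel with
  | zero =>
    intro l acc h
    have : l = [] := List.length_eq_zero_iff.mp (Nat.le_zero.mp h)
    subst this
    simp [PySem.Chars.replace.go, repl]
  | succ f ih =>
    intro l acc h
    match l with
    | [] => simp [PySem.Chars.replace.go, repl]
    | [c] =>
      have hpre : ¬ (List.isPrefixOf ['\\', '"'] [c] = true) := by
        simp [List.isPrefixOf]
      simp only [PySem.Chars.replace.go, if_neg hpre]
      rw [ih [] (c :: acc) (by simp)]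
      simp [repl]
    | c :: d :: t =>
      by_cases hcd : c = '\\' ∧ d = '"'
      · obtain ⟨h1, h2⟩ := hcd; subst h1; subst h2
        have hpre : List.isPrefixOf ['\\', '"'] ('\\' :: '"' :: t) = true := by
          simp [List.isPrefixOf]
        simp only [PySem.Chars.replace.go, if_pos hpre]
        have hdrop : List.drop (['\\', '"'] : List Char).length ('\\' :: '"' :: t) = t := by simp
        rw [hdrop, ih t (['\\', '\x00'].reverse ++ acc) (by simp at h ⊢; omega)]
        simp [repl]
      · have hpre : ¬ (List.isPrefixOf ['\\', '"'] (c :: d :: t) = true) := by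
          simp only [List.isPrefixOf]
          intro hcontra
          simp only [Bool.and_eq_true, beq_iff_eq] at hcontra
          rcases hcontra with ⟨hc, hd, -⟩
          exact hcd ⟨hc.symm, hd.symm⟩
        simp only [PySem.Chars.replace.go, if_neg hpre]
        rw [ih (d :: t) (c :: acc) (by simp at h ⊢; omega)]
        simp only [repl, if_neg hcd]
        simp

lemma replace_eq (cs : List Char) :
    PySem.Chars.replace cs ['\\', '"'] ['\\', '\x00'] = repl cs := by
  have : (['\\', '"'] : List Char).isEmpty = false := by decide
  simp only [PySem.Chars.replace, this]
  rw [replace_go cs.length cs [] le_rfl]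
  simp

lemma splitOn_go (fuel : Nat) : ∀ (l cur : List Char) (acc : List (List Char)), l.length ≤ fuel →
    PySem.Chars.splitOn.go ['"'] fuel l cur acc
      = acc.reverse ++ (splitQ l).modifyHead (cur.reverse ++ ·) := by
  induction fuel with
  | zero =>
    intro l cur acc h
    have : l = [] := List.length_eq_zero_iff.mp (Nat.le_zero.mp h)
    subst this
    simp [PySem.Chars.splitOn.go, splitQ, List.modifyHead]
  | succ f ih =>
    intro l cur acc h
    match l with
    | [] => simp [PySem.Chars.splitOn.go, splitQ, List.modifyHead]
    | c :: t =>
      by_cases hc : c = '"'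
      · subst hc
        have hpre : List.isPrefixOf ['"'] ('"' :: t) = true := by simp [List.isPrefixOf]
        simp only [PySem.Chars.splitOn.go, if_pos hpre]
        have hdrop : List.drop (['"'] : List Char).length ('"' :: t) = t := by simp
        rw [hdrop, ih t [] (cur.reverse :: acc) (by simp at h ⊢; omega)]
        have hq : splitQ ('"' :: t) = [] :: splitQ t := by simp [splitQ]
        rw [hq]
        cases hsp : splitQ t with
        | nil => exact absurd hsp (splitQ_ne_nil t)
        | cons a u => simp [List.modifyHead]
      · have hpre : ¬ (List.isPrefixOf ['"'] (c :: t) = true) := by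
          simp only [List.isPrefixOf, Bool.and_eq_true, beq_iff_eq]
          exact fun hh => hc hh.1.symm
        simp only [PySem.Chars.splitOn.go, if_neg hpre]
        rw [ih t (c :: cur) acc (by simp at h ⊢; omega)]
        have hq : splitQ (c :: t) = (splitQ t).modifyHead (c :: ·) := by simp [splitQ, hc]
        rw [hq]
        cases hsp : splitQ t with
        | nil => exact absurd hsp (splitQ_ne_nil t)
        | cons a u => simp [List.modifyHead]

lemma splitOn_eq (cs : List Char) : PySem.Chars.splitOn cs ['"'] = splitQ cs := by
  simp only [PySem.Chars.splitOn]
  rw [splitOn_go (cs.length + 1) cs [] [] (by omega)]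
  cases hsp : splitQ cs with
  | nil => exact absurd hsp (splitQ_ne_nil cs)
  | cons a u => simp [List.modifyHead]

-- the quotes surviving the rewriting are exactly A's non-escaped quotes
lemma idxQ_repl (cs : List Char) : ∀ (n : Int) (p : Option Char),
    (p ≠ some '\\' ∨ cs.head? ≠ some '"') → idxQ (repl cs) n = qlist cs n p := by
  induction cs using repl.induct with
  | case1 => intro n p _; simp [repl, idxQ, qlist]
  | case2 c =>
    intro n p hp
    by_cases hc : c = '"'
    · subst hc
      have hp' : p ≠ some '\\' := by
        rcases hp with h | h
        · exact h
        · simp at h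
      simp [repl, idxQ, qlist, hp']
    · simp [repl, idxQ, qlist, hc]
  | case3 c d t hcd ih =>
    intro n p _
    obtain ⟨h1, h2⟩ := hcd; subst h1; subst h2
    have e1 : repl ('\\' :: '"' :: t) = '\\' :: '\x00' :: repl t := by simp [repl]
    rw [e1]
    have e2 : idxQ ('\\' :: '\x00' :: repl t) n = idxQ (repl t) (n + 1 + 1) := by
      simp [idxQ]
    have e3 : qlist ('\\' :: '"' :: t) n p = qlist t (n + 1 + 1) (some '"') := by
      have hb : ¬ (('\\' : Char) = '"' ∧ p ≠ some '\\') := by intro h; exact absurd h.1 (by decide)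
      have hq : ¬ (('"' : Char) = '"' ∧ (some '\\' : Option Char) ≠ some '\\') := by simp
      simp [qlist]
    rw [e2, e3]
    exact ih (n + 1 + 1) (some '"') (Or.inl (by decide))
  | case4 c d t hcd ih =>
    intro n p hp
    have e1 : repl (c :: d :: t) = c :: repl (d :: t) := by simp [repl, hcd]
    rw [e1]
    by_cases hc : c = '"'
    · subst hc
      have hp' : p ≠ some '\\' := by
        rcases hp with h | h
        · exact h
        · simp at h
      simp only [idxQ]
      have hql : qlist ('"' :: d :: t) n p = n :: qlist (d :: t) (n + 1) (some '"') := by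
        show (if ('"' : Char) = '"' ∧ p ≠ some '\\' then n :: qlist (d :: t) (n + 1) (some '"')
          else qlist (d :: t) (n + 1) (some '"')) = _
        rw [if_pos ⟨rfl, hp'⟩]
      rw [hql]
      rw [ih (n + 1) (some '"') (Or.inl (by decide))]
      simp
    · have hnext : (some c : Option Char) ≠ some '\\' ∨ (d :: t).head? ≠ some '"' := by
        by_cases hcb : c = '\\'
        · subst hcb
          right
          simp only [List.head?_cons, ne_eq, Option.some.injEq]
          intro hd
          exact hcd ⟨rfl, hd⟩
        · exact Or.inl (by simpa using hcb)
      simp only [idxQ, if_neg hc, qlist]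
      rw [if_neg (fun h => hc h.1)]
      exact ih (n + 1) (some c) hnext

lemma idxQ_posFrom (l : List Char) : ∀ (pos : Int), idxQ l pos = posFrom (splitQ l) pos := by
  induction l with
  | nil => intro pos; simp [idxQ, splitQ, posFrom]
  | cons c t ih =>
    intro pos
    by_cases hc : c = '"'
    · subst hc
      have hq : splitQ ('"' :: t) = [] :: splitQ t := by simp [splitQ]
      rw [hq]
      cases hsp : splitQ t with
      | nil => exact absurd hsp (splitQ_ne_nil t)
      | cons a u =>
        simp only [idxQ, posFrom]
        rw [ih (pos + 1), hsp]
        simp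
    · have hq : splitQ (c :: t) = (splitQ t).modifyHead (c :: ·) := by simp [splitQ, hc]
      rw [hq]
      cases hsp : splitQ t with
      | nil => exact absurd hsp (splitQ_ne_nil t)
      | cons a u =>
        simp only [idxQ, if_neg hc, List.modifyHead]
        rw [ih (pos + 1), hsp]
        cases u with
        | nil => simp [posFrom]
        | cons b v =>
          simp only [posFrom, List.length_cons]
          congr 1
          · push_cast; ring
          · congr 1; push_cast; ring

lemma pairCheck_eq (lo hi : Int) : ∀ (q : List Int),
    pairCheck q lo hi = (qpairs q).any (fun pr => decide (lo > pr.1) && decide (hi < pr.2))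
  | [] => rfl
  | [_] => rfl
  | a :: b :: t => by
    simp only [pairCheck, qpairs, List.any_cons]
    rw [pairCheck_eq lo hi t]
    split_ifs with h <;> simp_all

lemma segWalk_pairCheck : ∀ (parts : List (List Char)) (pos lo hi : Int),
    segWalk parts pos lo hi = pairCheck (posFrom parts pos) lo hi
  | [], _, _, _ => rfl
  | [_], _, _, _ => rfl
  | [s, q], pos, lo, hi => by simp [segWalk, posFrom, pairCheck]
  | s :: q :: r :: t, pos, lo, hi => by
    simp only [segWalk, posFrom, pairCheck]
    rw [segWalk_pairCheck (r :: t)]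
    have h1 : decide (pos + (s.length : Int) + 1 ≤ lo) = decide (lo > pos + (s.length : Int)) := by
      simp only [decide_eq_decide]; omega
    have h2 : decide (hi ≤ pos + (s.length : Int) + 1 + (q.length : Int))
        = decide (hi < pos + (s.length : Int) + 1 + (q.length : Int) + 1) := by
      simp only [decide_eq_decide]; omega
    rw [h1, h2]

-- ===== A-side characterisation =====

-- A's index-fold from pre.length equals the char-level loop on the suffix
lemma a_fold (s : String) (suf : List Char) : ∀ (pre : List Char) (st : Bool × Int × List (Int × Int)),
    s.toList = pre ++ suf →
    (PySem.List.pyRange (pre.length) (PySem.Str.len s) 1).foldl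
      (fun (st : Bool × Int × List (Int × Int)) i =>
        if PySem.Str.pyGet? s i == some '"' && (i == 0 || PySem.Str.pyGet? s (i-1) != some '\\') then
          if st.1 then (false, st.2.1, st.2.2 ++ [(st.2.1, i+1)])
          else (true, i, st.2.2)
        else st) st
    = loopC suf (pre.length) (pre.getLast?) st := by
  induction suf with
  | nil =>
    intro pre st hs
    have hlen : PySem.Str.len s = (pre.length : Int) := by simp [hs]
    rw [hlen, PySem.List.pyRange_one_eq_nil le_rfl]
    rfl
  | cons c t ih =>
    intro pre st hs
    have hlen : PySem.Str.len s = (pre.length : Int) + 1 + t.length := by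
      simp [hs]; ring
    have hlt : (pre.length : Int) < PySem.Str.len s := by
      rw [hlen]; have : (0:Int) ≤ t.length := by positivity
      omega
    rw [PySem.List.pyRange_one_cons hlt, List.foldl_cons]
    have hget : PySem.Str.pyGet? s ((pre.length : Int)) = some c := by
      simp only [PySem.Str.pyGet?_eq, PySem.Chars.pyGet?_eq_listPyGet?, hs]
      exact PySem.List.pyGet?_append_length pre t c
    have hcond : (((pre.length : Int) == 0) || (PySem.Str.pyGet? s ((pre.length : Int) - 1) != some '\\'))
        = decide (pre.getLast? ≠ some '\\') := by
      rcases List.eq_nil_or_concat pre with hpre | ⟨p₀, z, hpre⟩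
      · subst hpre; simp
      · rw [List.concat_eq_append] at hpre
        subst hpre
        have h2 : PySem.Str.pyGet? s (((p₀ ++ [z]).length : Int) - 1) = some z := by
          have : ((p₀ ++ [z]).length : Int) - 1 = (p₀.length : Int) := by
            simp only [List.length_append, List.length_cons, List.length_nil]
            push_cast; ring
          rw [this]
          simp only [PySem.Str.pyGet?_eq, PySem.Chars.pyGet?_eq_listPyGet?, hs]
          have : p₀ ++ [z] ++ c :: t = p₀ ++ z :: (c :: t) := by simp
          rw [this]
          exact PySem.List.pyGet?_append_length p₀ (c :: t) z
        rw [h2, List.getLast?_concat]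
        have h0 : ((((p₀ ++ [z]).length : Int)) == 0) = false := by
          rw [beq_eq_false_iff_ne]
          simp only [List.length_append, List.length_cons, List.length_nil]
          omega
        rw [h0]
        by_cases hz : z = '\\' <;> simp [bne, hz]
    have hs' : s.toList = (pre ++ [c]) ++ t := by simp [hs]
    have ihc := ih (pre ++ [c])
    have hlen' : ((pre ++ [c]).length : Int) = (pre.length : Int) + 1 := by
      simp only [List.length_append, List.length_cons, List.length_nil]
      push_cast; ring
    have hlast' : (pre ++ [c]).getLast? = some c := List.getLast?_concat
    simp only [hget, hcond] at *
    by_cases hcp : c = '"' ∧ pre.getLast? ≠ some '\\'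
    · have hb : ((some c == some '"') && decide (pre.getLast? ≠ some '\\')) = true := by
        simp [hcp.1, hcp.2]
      rw [if_pos hb]
      simp only [loopC, if_pos hcp]
      by_cases hst : st.1
      · rw [if_pos hst, if_pos hst]
        have := ihc (false, st.2.1, st.2.2 ++ [(st.2.1, (pre.length : Int) + 1)]) hs'
        rw [hlen', hlast'] at this
        exact this
      · rw [if_neg hst, if_neg hst]
        have := ihc (true, (pre.length : Int), st.2.2) hs'
        rw [hlen', hlast'] at this
        exact this
    · have hb : ¬(((some c == some '"') && decide (pre.getLast? ≠ some '\\')) = true) := by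
        intro hcontra
        simp only [Bool.and_eq_true, beq_iff_eq, Option.some.injEq, decide_eq_true_eq] at hcontra
        exact hcp ⟨hcontra.1, hcontra.2⟩
      rw [if_neg hb]
      simp only [loopC, if_neg hcp]
      have := ihc st hs'
      rw [hlen', hlast'] at this
      exact this

lemma qlist_append (pre : List Char) (suf : List Char) (hq : '"' ∉ pre) :
    ∀ (n : Int) (p : Option Char),
    qlist (pre ++ suf) n p = qlist suf (n + pre.length) (pre.getLast?.or p) := by
  induction pre with
  | nil => simp
  | cons c t ih =>
    intro n p
    have hc : c ≠ '"' := by intro h; exact hq (by simp [h])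
    have ht : '"' ∉ t := fun h => hq (by simp [h])
    have hcond : ¬(c = '"' ∧ p ≠ some '\\') := fun h => hc h.1
    simp only [List.cons_append, qlist, if_neg hcond]
    rw [ih ht (n+1) (some c)]
    have hl : (c :: t).getLast?.or p = t.getLast?.or (some c) := by
      cases t with
      | nil => simp
      | cons d u =>
        obtain ⟨x, hx⟩ := Option.isSome_iff_exists.mp (List.getLast?_isSome.mpr (List.cons_ne_nil d u))
        rw [List.getLast?_cons_cons, hx]
        simp [Option.or]
    have hn : n + ((c :: t).length : Int) = n + 1 + (t.length : Int) := by
      push_cast [List.length_cons]; ring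
    rw [hl, hn]

lemma loop_ranges (cs : List Char) : ∀ (n : Int) (p : Option Char) (pq : Int) (racc : List (Int × Int)),
    (loopC cs n p (false, pq, racc)).2.2 = racc ++ qpairs (qlist cs n p)
    ∧ (loopC cs n p (true, pq, racc)).2.2 =
        racc ++ (match qlist cs n p with
                 | [] => []
                 | a :: t => (pq, a+1) :: qpairs t) := by
  induction cs with
  | nil => simp [loopC, qlist, qpairs]
  | cons c t ih =>
    intro n p pq racc
    by_cases hc : c = '"' ∧ p ≠ some '\\'
    · constructor
      · simp only [loopC, qlist, if_pos hc]
        rw [if_neg (by simp)]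
        rw [(ih (n+1) (some c) n racc).2]
        cases hq : qlist t (n+1) (some c) with
        | nil => simp [qpairs]
        | cons a u => simp only [qpairs]
      · simp only [loopC, qlist, if_pos hc]
        rw [if_pos trivial]
        rw [(ih (n+1) (some c) pq (racc ++ [(pq, n+1)])).1]
        simp
    · simp only [loopC, qlist, if_neg hc]
      exact ih (n+1) (some c) pq racc

-- characterisation of str.find for the single-char pattern '"'
lemma find_split (cs : List Char) : ∀ (k : Nat),
    (PySem.Chars.find.go ['"'] cs k = -1 ∧ '"' ∉ cs)
    ∨ (∃ pre suf, cs = pre ++ '"' :: suf ∧ '"' ∉ pre ∧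
        PySem.Chars.find.go ['"'] cs k = (k : Int) + pre.length) := by
  induction cs with
  | nil => intro k; left; simp [PySem.Chars.find.go]
  | cons c t ih =>
    intro k
    by_cases hc : c = '"'
    · right
      refine ⟨[], t, by simp [hc], by simp, ?_⟩
      simp [PySem.Chars.find.go, List.isPrefixOf, hc]
    · have hgo : PySem.Chars.find.go ['"'] (c :: t) k = PySem.Chars.find.go ['"'] t (k+1) := by
        simp [PySem.Chars.find.go, List.isPrefixOf, Ne.symm hc]
      rcases ih (k+1) with ⟨h1, h2⟩ | ⟨pre, suf, heq, hnq, hval⟩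
      · left
        refine ⟨by rw [hgo]; exact h1, ?_⟩
        intro hm
        rcases List.mem_cons.mp hm with h | h
        · exact hc h.symm
        · exact h2 h
      · right
        refine ⟨c :: pre, suf, by simp [heq], ?_, ?_⟩
        · intro hm; rcases List.mem_cons.mp hm with h | h
          · exact hc h.symm
          · exact hnq h
        · rw [hgo, hval]; push_cast [List.length_cons]; ring

lemma qlist_nil_of_no_quote (cs : List Char) (h : '"' ∉ cs) : ∀ n p, qlist cs n p = [] := by
  induction cs with
  | nil => simp [qlist]
  | cons c t ih =>
    intro n p
    have hc : c ≠ '"' := fun hh => h (by simp [hh])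
    have hcond : ¬(c = '"' ∧ p ≠ some '\\') := fun hh => hc hh.1
    simp only [qlist, if_neg hcond]
    exact ih (fun hh => h (by simp [hh])) (n+1) (some c)

-- A equals pairCheck over the non-escaped quote positions
lemma a_char (s : String) (lo hi : Int) :
    within_quotes s lo hi = pairCheck (qlist s.toList 0 none) lo hi := by
  unfold within_quotes
  simp only []
  have htl : ("\"" : String).toList = ['"'] := by decide
  rcases find_split s.toList 0 with ⟨hfind, hnq⟩ | ⟨pre, suf, heq, hnq, hval⟩
  · have hf : PySem.Str.find s "\"" = -1 := by
      rw [PySem.Str.find_eq, htl]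
      simpa [PySem.Chars.find] using hfind
    rw [hf, qlist_nil_of_no_quote s.toList hnq 0 none]
    simp [pairCheck]
  · have hf : PySem.Str.find s "\"" = (pre.length : Int) := by
      rw [PySem.Str.find_eq, htl]
      simpa [PySem.Chars.find] using hval
    rw [hf]
    rw [if_neg (by simp)]
    rw [a_fold s ('"' :: suf) pre (false, (pre.length : Int), []) heq]
    rw [(loop_ranges ('"' :: suf) (pre.length : Int) pre.getLast? (pre.length : Int) []).1]
    have hB : qlist s.toList 0 none = qlist ('"' :: suf) (pre.length : Int) pre.getLast? := by
      rw [heq, qlist_append pre ('"' :: suf) hnq 0 none]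
      simp
    rw [hB, pairCheck_eq]
    simp [List.any_map]

-- B equals the same pairCheck
lemma b_char (s : String) (lo hi : Int) :
    within_quotes_alt s lo hi = pairCheck (qlist s.toList 0 none) lo hi := by
  unfold within_quotes_alt
  have htl : ('\\' :: ("\"" : String).toList) = ['\\', '"'] := by decide
  have htl2 : ("\"" : String).toList = ['"'] := by decide
  rw [htl, htl2, replace_eq, splitOn_eq, segWalk_pairCheck, ← idxQ_posFrom,
    idxQ_repl s.toList 0 none (Or.inl (by decide))]

-- ===== VERDICT (by name: the statement is the Claim_ definition above) =====
theorem within_quotes_spec : Claim_equal_within_quotes := by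
  intro s lo hi _
  unfold Spec_within_quotes
  rw [a_char, b_char]
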